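-- pv_equiv track=rewrite | github.com/ul611/ML2021_HWs | hw1_numpy1/check_first_sentence_is_second.py | check_first_sentence_is_second
-- ===== SOURCE A (Python) =====
-- from collections import Counter
--
-- def check_first_sentence_is_second(sentence_1, sentence_2):
--     dict_1 = Counter(sentence_1.split())
--     dict_2 = Counter(sentence_2.split())
--     answer = True
--     for word in dict_2:
--         if word not in dict_1 or dict_1[word] < dict_2[word]:
--             answer = False
--             break
--     return answer
-- ===== SOURCE B (Python) =====
-- def check_first_sentence_is_second(sentence_1, sentence_2):
--     pool = sentence_1.split()
--     for word in sentence_2.split():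
--         try:
--             pool.remove(word)
--         except ValueError:
--             return False
--     return True
-- ===== Notes on version B (the rewrite author's own statement) =====
-- stated objective: alternative
-- what changed: Drops Counter entirely: B consumes words of sentence_2 one by one from a mutable pool list of sentence_1's words via list.remove, returning False on the first word that cannot be consumed.
import Mathlib
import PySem

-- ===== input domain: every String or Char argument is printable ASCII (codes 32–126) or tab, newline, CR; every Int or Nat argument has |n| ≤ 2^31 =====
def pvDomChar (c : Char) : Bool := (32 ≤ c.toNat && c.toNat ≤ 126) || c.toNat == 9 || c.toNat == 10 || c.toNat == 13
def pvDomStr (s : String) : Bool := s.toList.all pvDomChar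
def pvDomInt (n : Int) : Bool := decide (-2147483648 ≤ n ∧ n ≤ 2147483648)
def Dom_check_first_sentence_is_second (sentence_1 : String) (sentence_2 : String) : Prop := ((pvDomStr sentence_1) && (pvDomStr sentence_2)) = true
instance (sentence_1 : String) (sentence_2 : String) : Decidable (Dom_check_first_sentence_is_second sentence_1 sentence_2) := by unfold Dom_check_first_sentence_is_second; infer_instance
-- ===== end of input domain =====

-- B drops Counter entirely: it consumes each word of sentence_2 from a pool list of
-- sentence_1's words via list.remove, failing on the first unconsumable word
-- (objective: alternative algorithm, no hashing/counting).

-- ===== PORT A =====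
-- the 'for word in dict_2: if word not in dict_1 or dict_1[word] < dict_2[word]: answer = False; break' loop
def pvA_loop (d1 d2 : PySem.Dict String Int) : List String → Bool
  | [] => true
  | w :: ws =>
      if !(d1.contains w) || decide (d1.getD w 0 < d2.getD w 0) then false
      else pvA_loop d1 d2 ws

def check_first_sentence_is_second (sentence_1 : String) (sentence_2 : String) : Bool :=
  let dict_1 := PySem.Dict.counter (PySem.Str.split₀ sentence_1)
  let dict_2 := PySem.Dict.counter (PySem.Str.split₀ sentence_2)
  pvA_loop dict_1 dict_2 dict_2.keys

-- ===== PORT B =====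
-- the 'for word in sentence_2.split(): try: pool.remove(word) except ValueError: return False' loop
def pvB_loop (pool : List String) : List String → Bool
  | [] => true
  | w :: ws =>
      match PySem.List.remove? pool w with
      | none => false
      | some pool' => pvB_loop pool' ws

def check_first_sentence_is_second_alt (sentence_1 : String) (sentence_2 : String) : Bool :=
  pvB_loop (PySem.Str.split₀ sentence_1) (PySem.Str.split₀ sentence_2)

-- ===== PRECONDITION & SPEC =====
def Spec_check_first_sentence_is_second (sentence_1 : String) (sentence_2 : String) (out : Bool) : Prop := out = check_first_sentence_is_second_alt sentence_1 sentence_2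
instance (sentence_1 : String) (sentence_2 : String) (out : Bool) : Decidable (Spec_check_first_sentence_is_second sentence_1 sentence_2 out) := by unfold Spec_check_first_sentence_is_second; infer_instance

-- ===== CLAIM (what is proved, stated in full; the proofs are below) =====
def Claim_equal_check_first_sentence_is_second : Prop := ∀ (sentence_1 : String) (sentence_2 : String), Dom_check_first_sentence_is_second sentence_1 sentence_2 → Spec_check_first_sentence_is_second sentence_1 sentence_2 (check_first_sentence_is_second sentence_1 sentence_2)

-- ===== LEMMAS AND PROOFS =====

-- A's loop over the keys of Counter xs2 is the 'all counts dominated' test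
theorem pvA_loop_eq (xs1 xs2 : List String) (L : List String)
    (h : ∀ w ∈ L, 1 ≤ xs2.count w) :
    pvA_loop (PySem.Dict.counter xs1) (PySem.Dict.counter xs2) L
      = L.all (fun w => decide ((xs2.count w : Int) ≤ (xs1.count w : Int))) := by
  induction L with
  | nil => rfl
  | cons w ws ih =>
      have hw : 1 ≤ xs2.count w := h w (List.mem_cons_self)
      have hc1 : (PySem.Dict.counter xs1 : PySem.Dict String Int).getD w 0 = (xs1.count w : Int) :=
        PySem.Dict.getD_counter xs1 w
      have hc2 : (PySem.Dict.counter xs2 : PySem.Dict String Int).getD w 0 = (xs2.count w : Int) :=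
        PySem.Dict.getD_counter xs2 w
      have hcontains : (PySem.Dict.counter xs1 : PySem.Dict String Int).contains w = decide (w ∈ xs1) := by
        simp [PySem.Dict.contains_counter]
      rw [pvA_loop, List.all_cons, hc1, hc2, hcontains]
      by_cases hmem : w ∈ xs1
      · by_cases hlt : (xs1.count w : Int) < (xs2.count w : Int)
        · simp [hmem, hlt, not_le.mpr hlt]
        · simp [hmem, hlt, not_lt.mp hlt, ih (fun x hx => h x (List.mem_cons_of_mem _ hx))]
      · have h0 : xs1.count w = 0 := List.count_eq_zero.mpr hmem
        have : (xs1.count w : Int) < (xs2.count w : Int) := by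
          rw [h0]; exact_mod_cast Nat.lt_of_lt_of_le Nat.zero_lt_one hw
        simp [hmem, not_le.mpr this]

-- B's pool-consumption loop succeeds iff every word count of ws is covered by the pool
theorem pvB_loop_iff (ws : List String) : ∀ (pool : List String),
    pvB_loop pool ws = true ↔ ∀ x, ws.count x ≤ pool.count x := by
  induction ws with
  | nil => intro pool; simp [pvB_loop]
  | cons w ws ih =>
      intro pool
      by_cases hmem : w ∈ pool
      · have hrem := PySem.List.remove?_eq_some_erase pool w hmem
        simp only [pvB_loop, hrem]
        rw [ih (pool.erase w)]
        have h1 : 1 ≤ pool.count w := List.one_le_count_iff.mpr hmem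
        constructor
        · intro h x
          have hx := h x
          have hcnt : List.count x (pool.erase w)
              = List.count x pool - if (w == x) = true then 1 else 0 := List.count_erase
          rw [List.count_cons]
          by_cases hxw : w = x
          · subst hxw
            have hcnt2 : List.count w (pool.erase w) = List.count w pool - 1 :=
              List.count_erase_self
            simp
            omega
          · simp [hxw] at hcnt ⊢; omega
        · intro h x
          have hx := h x
          have hcnt : List.count x (pool.erase w)
              = List.count x pool - if (w == x) = true then 1 else 0 := List.count_erase
          rw [List.count_cons] at hx
          by_cases hxw : w = x
          · subst hxw
            have hcnt2 : List.count w (pool.erase w) = List.count w pool - 1 :=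
              List.count_erase_self
            simp at hx
            omega
          · simp [hxw] at hcnt hx ⊢; omega
      · have hnone := (PySem.List.remove?_eq_none_iff pool w).mpr hmem
        simp only [pvB_loop, hnone, Bool.false_eq_true, false_iff]
        intro h
        have := h w
        have h0 : pool.count w = 0 := List.count_eq_zero.mpr hmem
        rw [List.count_cons_self, h0] at this
        omega

-- ===== VERDICT (by name: the statement is the Claim_ definition above) =====
theorem check_first_sentence_is_second_spec : Claim_equal_check_first_sentence_is_second := by
  intro s1 s2 _
  unfold Spec_check_first_sentence_is_second
  unfold check_first_sentence_is_second check_first_sentence_is_second_alt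
  set xs1 := PySem.Str.split₀ s1 with hxs1
  set xs2 := PySem.Str.split₀ s2 with hxs2
  show pvA_loop (PySem.Dict.counter xs1) (PySem.Dict.counter xs2)
      (PySem.Dict.counter xs2 : PySem.Dict String Int).keys = pvB_loop xs1 xs2
  rw [PySem.Dict.keys_counter]
  rw [pvA_loop_eq xs1 xs2 _ (fun w hw => List.one_le_count_iff.mpr ((PySem.Set.mem_ofList _ _).mp hw))]
  rw [Bool.eq_iff_iff, List.all_eq_true, pvB_loop_iff]
  constructor
  · intro h x
    by_cases hx : x ∈ xs2
    · have := h x ((PySem.Set.mem_ofList _ _).mpr hx)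
      simp only [decide_eq_true_eq] at this
      exact_mod_cast this
    · simp [List.count_eq_zero.mpr hx]
  · intro h w _
    simp only [decide_eq_true_eq]
    exact_mod_cast h w
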